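-- pv_equiv track=rewrite | github.com/Mariann91/Python-SoftUni | Fundamentals/lists_basics_more_exercises/list_manipulator/first_last_count_even_odd.py | last_count_odd
-- ===== SOURCE A (Python) =====
-- def last_count_odd(count, input_list):
--     odd_counter = 0
--     count_odd_list = []
--     for i in range(len(input_list) - 1, - 1, -1):
--         if input_list[i] % 2 != 0:
--             odd_counter += 1
--             count_odd_list.append(input_list[i])
--             if odd_counter == count:
--                 break
--     return count_odd_list
-- ===== SOURCE B (Python) =====
-- def last_count_odd(count, input_list):
--     rev = [x for x in input_list if x % 2 != 0][::-1]
--     return rev[:count] if count > 0 else rev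
-- ===== Notes on version B (the rewrite author's own statement) =====
-- stated objective: simpler
-- what changed: Replaces the backward index loop with an early-exit counter by a forward filter comprehension, a reversal and a slice (all odds kept when count is non-positive, matching A's never-triggered break).
import Mathlib
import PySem

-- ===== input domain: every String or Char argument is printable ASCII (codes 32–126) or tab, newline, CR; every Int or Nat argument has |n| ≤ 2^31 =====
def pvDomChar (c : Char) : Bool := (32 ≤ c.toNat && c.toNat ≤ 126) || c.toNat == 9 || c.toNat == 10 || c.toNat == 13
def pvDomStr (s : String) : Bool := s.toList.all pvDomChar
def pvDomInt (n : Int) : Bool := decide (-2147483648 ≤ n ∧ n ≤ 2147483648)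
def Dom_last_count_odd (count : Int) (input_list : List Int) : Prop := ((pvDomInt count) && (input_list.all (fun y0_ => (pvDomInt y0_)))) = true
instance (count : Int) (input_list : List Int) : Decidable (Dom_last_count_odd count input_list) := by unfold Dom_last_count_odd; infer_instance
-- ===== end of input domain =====

-- B replaces A's backward early-exit loop by a forward filter, a reversal and a slice (simpler).

-- ===== PORT A =====
-- loop over i = len-1 .. 0; fuel = i+1 so the index accessed is fuel-1.
-- input_list[i]: index is always in range here, so getD i 0 is exact.
def lastCountOddLoopA (count : Int) (input_list : List Int) : Nat → Int → List Int → List Int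
  | 0, _, acc => acc
  | i + 1, odd_counter, acc =>
    let x := input_list.getD i 0
    if PySem.Int.mod x 2 ≠ 0 then
      let odd_counter := odd_counter + 1
      let acc := acc ++ [x]
      if odd_counter = count then acc
      else lastCountOddLoopA count input_list i odd_counter acc
    else lastCountOddLoopA count input_list i odd_counter acc

def last_count_odd (count : Int) (input_list : List Int) : List Int :=
  lastCountOddLoopA count input_list input_list.length 0 []

-- ===== PORT B =====
def last_count_odd_alt (count : Int) (input_list : List Int) : List Int :=
  let rev := (input_list.filter (fun x => PySem.Int.mod x 2 ≠ 0)).reverse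
  if count > 0 then rev.take count.toNat else rev

-- ===== PRECONDITION & SPEC =====
def Spec_last_count_odd (count : Int) (input_list : List Int) (out : List Int) : Prop := out = last_count_odd_alt count input_list
instance (count : Int) (input_list : List Int) (out : List Int) : Decidable (Spec_last_count_odd count input_list out) := by unfold Spec_last_count_odd; infer_instance

-- ===== CLAIM (what is proved, stated in full; the proofs are below) =====
def Claim_equal_last_count_odd : Prop := ∀ (count : Int) (input_list : List Int), Dom_last_count_odd count input_list → Spec_last_count_odd count input_list (last_count_odd count input_list)

-- ===== LEMMAS AND PROOFS =====
lemma loopA_invariant (count : Int) (xs : List Int) :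
    ∀ (i : Nat) (oc : Int) (acc : List Int), i ≤ xs.length → 0 ≤ oc → (count ≤ 0 ∨ oc < count) →
    lastCountOddLoopA count xs i oc acc =
      acc ++ (if count > 0
        then (((xs.take i).filter (fun x => PySem.Int.mod x 2 ≠ 0)).reverse).take (count - oc).toNat
        else ((xs.take i).filter (fun x => PySem.Int.mod x 2 ≠ 0)).reverse) := by
  intro i
  induction i with
  | zero => intro oc acc _ _ _; simp [lastCountOddLoopA]
  | succ i ih =>
    intro oc acc hle hnn hoc
    have hi : i < xs.length := by omega
    have htake : xs.take (i + 1) = xs.take i ++ [xs[i]] := by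
      rw [List.take_add_one, List.getElem?_eq_getElem hi]; rfl
    rw [lastCountOddLoopA, htake]
    have hget : xs.getD i 0 = xs[i] := by simp [List.getD, List.getElem?_eq_getElem hi]
    rw [hget]
    by_cases hodd : PySem.Int.mod xs[i] 2 ≠ 0
    · simp only [List.filter_append, List.filter_cons, List.filter_nil,
        decide_eq_true_eq, if_pos hodd, List.reverse_append, List.reverse_cons,
        List.reverse_nil, List.nil_append, List.cons_append]
      by_cases hbreak : oc + 1 = count
      · have hpos : count > 0 := by omega
        have h1 : (count - oc).toNat = 1 := by omega
        simp [hbreak, hpos, h1]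
      · have hle' : i ≤ xs.length := by omega
        have hoc' : count ≤ 0 ∨ oc + 1 < count := by omega
        rw [if_neg hbreak, ih (oc + 1) (acc ++ [xs[i]]) hle' (by omega) hoc']
        by_cases hpos : count > 0
        · have h2 : (count - oc).toNat = (count - (oc + 1)).toNat + 1 := by omega
          simp [hpos, h2]
        · simp [hpos]
    · simp only [if_neg hodd]
      rw [ih oc acc (by omega) hnn hoc]
      simp only [List.filter_append, List.filter_cons, List.filter_nil,
        decide_eq_true_eq, if_neg hodd]
      simp

-- ===== VERDICT (by name: the statement is the Claim_ definition above) =====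
theorem last_count_odd_spec : Claim_equal_last_count_odd := by
  intro count input_list _
  unfold Spec_last_count_odd last_count_odd last_count_odd_alt
  rw [loopA_invariant count input_list input_list.length 0 [] (le_refl _)
    (by omega) (by omega), List.take_length]
  by_cases hpos : count > 0 <;> simp [hpos]
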